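-- pv_equiv track=rewrite | github.com/sztokula/DISCORD-SELFBOT-PY | build_number_updater.py | _prioritize_js_urls
-- ===== SOURCE A (Python) =====
-- def _prioritize_js_urls(urls):
--     seen = set()
--     unique = []
--     for url in urls:
--         if url in seen:
--             continue
--         seen.add(url)
--         unique.append(url)
--     scored = []
--     for url in unique:
--         score = 0
--         lowered = url.lower()
--         if "app" in lowered or "main" in lowered:
--             score += 2
--         if "web" in lowered:
--             score += 1
--         scored.append((score, url))
--     scored.sort(key=lambda item: item[0], reverse=True)
--     return [url for _, url in scored]
-- ===== SOURCE B (Python) =====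
-- def _prioritize_js_urls(urls):
--     # Bucket by score (0..3) in one pass over the deduped stream; no sort needed.
--     seen = set()
--     b3, b2, b1, b0 = [], [], [], []
--     for url in urls:
--         if url in seen:
--             continue
--         seen.add(url)
--         lowered = url.lower()
--         score = (2 if ("app" in lowered or "main" in lowered) else 0) + (1 if "web" in lowered else 0)
--         if score == 3:
--             b3.append(url)
--         elif score == 2:
--             b2.append(url)
--         elif score == 1:
--             b1.append(url)
--         else:
--             b0.append(url)
--     return b3 + b2 + b1 + b0
-- ===== Notes on version B (the rewrite author's own statement) =====
-- stated objective: alternative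
-- what changed: Replaces the build-(score,url)-tuples-then-stable-reverse-sort pipeline with a single pass that appends each first-seen URL to one of four score buckets and returns the buckets concatenated in descending score order.
import Mathlib
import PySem

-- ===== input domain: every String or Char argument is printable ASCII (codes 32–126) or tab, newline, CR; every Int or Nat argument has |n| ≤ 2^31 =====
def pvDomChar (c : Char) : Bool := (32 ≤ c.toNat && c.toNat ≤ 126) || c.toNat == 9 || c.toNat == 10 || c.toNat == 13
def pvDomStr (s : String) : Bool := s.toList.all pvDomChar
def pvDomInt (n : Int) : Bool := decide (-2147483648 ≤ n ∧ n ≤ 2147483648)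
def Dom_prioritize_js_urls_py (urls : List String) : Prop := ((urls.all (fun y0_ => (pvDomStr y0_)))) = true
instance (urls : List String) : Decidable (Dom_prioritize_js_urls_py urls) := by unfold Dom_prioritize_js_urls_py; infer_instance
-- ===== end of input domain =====

-- B replaces the build-tuples-then-stable-reverse-sort pipeline with one pass into four
-- score buckets concatenated in descending score order (objective: alternative).

-- ===== PORT A =====
def pvDedupStep (st : PySem.Set String × List String) (url : String) :
    PySem.Set String × List String :=
  if PySem.Set.contains st.1 url then st
  else (PySem.Set.add st.1 url, st.2 ++ [url])

def pvScoreStepA (scored : List (Int × String)) (url : String) : List (Int × String) :=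
  let score : Int := 0
  let lowered := PySem.Str.lower url
  let score := if PySem.Str.isIn "app" lowered || PySem.Str.isIn "main" lowered then score + 2 else score
  let score := if PySem.Str.isIn "web" lowered then score + 1 else score
  scored ++ [(score, url)]

def prioritize_js_urls_py (urls : List String) : List String :=
  let su := urls.foldl pvDedupStep (PySem.Set.empty, [])
  let scored := su.2.foldl pvScoreStepA []
  (PySem.List.sorted scored (fun item => item.1) true).map (fun p => p.2)

-- ===== PORT B =====
def pvScore (url : String) : Int :=
  (if PySem.Str.isIn "app" (PySem.Str.lower url) || PySem.Str.isIn "main" (PySem.Str.lower url) then 2 else 0)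
  + (if PySem.Str.isIn "web" (PySem.Str.lower url) then 1 else 0)

def pvBStep
    (st : PySem.Set String × (List String × List String × List String × List String))
    (url : String) :
    PySem.Set String × (List String × List String × List String × List String) :=
  if PySem.Set.contains st.1 url then st
  else
    let score := pvScore url
    let bs := st.2
    (PySem.Set.add st.1 url,
      if score == 3 then (bs.1 ++ [url], bs.2.1, bs.2.2.1, bs.2.2.2)
      else if score == 2 then (bs.1, bs.2.1 ++ [url], bs.2.2.1, bs.2.2.2)
      else if score == 1 then (bs.1, bs.2.1, bs.2.2.1 ++ [url], bs.2.2.2)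
      else (bs.1, bs.2.1, bs.2.2.1, bs.2.2.2 ++ [url]))

def prioritize_js_urls_py_alt (urls : List String) : List String :=
  let st := urls.foldl pvBStep (PySem.Set.empty, ([], [], [], []))
  st.2.1 ++ st.2.2.1 ++ st.2.2.2.1 ++ st.2.2.2.2

-- ===== PRECONDITION & SPEC =====
def Spec_prioritize_js_urls_py (urls : List String) (out : List String) : Prop := out = prioritize_js_urls_py_alt urls
instance (urls : List String) (out : List String) : Decidable (Spec_prioritize_js_urls_py urls out) := by unfold Spec_prioritize_js_urls_py; infer_instance

-- ===== CLAIM (what is proved, stated in full; the proofs are below) =====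
def Claim_equal_prioritize_js_urls_py : Prop := ∀ (urls : List String), Dom_prioritize_js_urls_py urls → Spec_prioritize_js_urls_py urls (prioritize_js_urls_py urls)

-- ===== LEMMAS AND PROOFS =====

-- the urls among u with a given score
def pvF (i : Int) (u : List String) : List String := u.filter (fun url => pvScore url == i)

lemma pvScore_cases (u : String) : pvScore u = 0 ∨ pvScore u = 1 ∨ pvScore u = 2 ∨ pvScore u = 3 := by
  simp only [pvScore]
  split_ifs <;> norm_num

lemma pvScoreStepA_eq (scored : List (Int × String)) (url : String) :
    pvScoreStepA scored url = scored ++ [(pvScore url, url)] := by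
  simp only [pvScoreStepA, pvScore]
  split_ifs <;> norm_num

lemma foldA_scored (u : List String) (acc : List (Int × String)) :
    u.foldl pvScoreStepA acc = acc ++ u.map (fun url => (pvScore url, url)) := by
  induction u generalizing acc with
  | nil => simp
  | cons x xs ih => simp [List.foldl_cons, pvScoreStepA_eq, ih]

lemma insertBy_append {α : Type} (before : α → α → Bool) (x : α) (l1 l2 : List α)
    (h : ∀ y ∈ l1, before x y = false) :
    PySem.List.insertBy before x (l1 ++ l2) = l1 ++ PySem.List.insertBy before x l2 := by
  induction l1 with
  | nil => simp
  | cons y ys ih =>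
      have hy := h y (by simp)
      simp only [List.cons_append, PySem.List.insertBy, hy, Bool.false_eq_true, if_false]
      rw [ih (fun z hz => h z (by simp [hz]))]

lemma insertBy_all_before {α : Type} (before : α → α → Bool) (x : α) (l : List α)
    (h : ∀ y ∈ l, before x y = true) :
    PySem.List.insertBy before x l = x :: l := by
  cases l with
  | nil => rfl
  | cons y ys => simp [PySem.List.insertBy, h y (by simp)]

lemma mem_filter_fst {i : Int} {xs : List (Int × String)} {y : Int × String}
    (h : y ∈ xs.filter (fun p => p.1 == i)) : y.1 = i := by
  have := List.of_mem_filter h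
  simpa using this

lemma sorted_rev_buckets (xs : List (Int × String))
    (h : ∀ p ∈ xs, p.1 = 0 ∨ p.1 = 1 ∨ p.1 = 2 ∨ p.1 = 3) :
    PySem.List.sorted xs (fun p => p.1) true =
      xs.filter (fun p => p.1 == 3) ++ xs.filter (fun p => p.1 == 2) ++
      xs.filter (fun p => p.1 == 1) ++ xs.filter (fun p => p.1 == 0) := by
  rw [PySem.List.sorted_rev_eq_foldl_insertBy]
  induction xs using List.reverseRecOn with
  | nil => rfl
  | append_singleton ys x ih =>
      have hys : ∀ p ∈ ys, p.1 = 0 ∨ p.1 = 1 ∨ p.1 = 2 ∨ p.1 = 3 :=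
        fun p hp => h p (by simp [hp])
      rw [List.foldl_append, List.foldl_cons, List.foldl_nil, ih hys]
      set before : (Int × String) → (Int × String) → Bool :=
        fun a b => decide (b.1 < a.1) with hb
      have hx := h x (by simp)
      have m3 : ∀ y ∈ ys.filter (fun p => p.1 == (3:Int)), y.1 = 3 :=
        fun y hy => mem_filter_fst hy
      have m2 : ∀ y ∈ ys.filter (fun p => p.1 == (2:Int)), y.1 = 2 :=
        fun y hy => mem_filter_fst hy
      have m1 : ∀ y ∈ ys.filter (fun p => p.1 == (1:Int)), y.1 = 1 :=
        fun y hy => mem_filter_fst hy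
      have m0 : ∀ y ∈ ys.filter (fun p => p.1 == (0:Int)), y.1 = 0 :=
        fun y hy => mem_filter_fst hy
      rcases hx with hk | hk | hk | hk
      · -- score 0 : x goes to the very end
        have hall : ∀ y ∈ ys.filter (fun p => p.1 == (3:Int)) ++ ys.filter (fun p => p.1 == (2:Int)) ++
            ys.filter (fun p => p.1 == (1:Int)) ++ ys.filter (fun p => p.1 == (0:Int)),
            before x y = false := by
          intro y hy
          simp only [List.mem_append] at hy
          rcases hy with ((hy | hy) | hy) | hy
          · simp [hb, m3 y hy, hk]
          · simp [hb, m2 y hy, hk]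
          · simp [hb, m1 y hy, hk]
          · simp [hb, m0 y hy, hk]
        rw [PySem.List.insertBy_of_forall_not_before _ _ _ hall]
        simp [List.filter_append, hk, List.append_assoc]
      · -- score 1 : after buckets 3,2,1
        have hpre : ∀ y ∈ ys.filter (fun p => p.1 == (3:Int)) ++ ys.filter (fun p => p.1 == (2:Int)) ++
            ys.filter (fun p => p.1 == (1:Int)), before x y = false := by
          intro y hy
          simp only [List.mem_append] at hy
          rcases hy with (hy | hy) | hy
          · simp [hb, m3 y hy, hk]
          · simp [hb, m2 y hy, hk]
          · simp [hb, m1 y hy, hk]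
        have hsuf : ∀ y ∈ ys.filter (fun p => p.1 == (0:Int)), before x y = true := by
          intro y hy; simp [hb, m0 y hy, hk]
        rw [insertBy_append before x _ _ hpre, insertBy_all_before before x _ hsuf]
        simp [List.filter_append, hk, List.append_assoc]
      · -- score 2 : after buckets 3,2
        rw [List.append_assoc]
        have hpre : ∀ y ∈ ys.filter (fun p => p.1 == (3:Int)) ++ ys.filter (fun p => p.1 == (2:Int)),
            before x y = false := by
          intro y hy
          simp only [List.mem_append] at hy
          rcases hy with hy | hy
          · simp [hb, m3 y hy, hk]
          · simp [hb, m2 y hy, hk]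
        have hsuf : ∀ y ∈ ys.filter (fun p => p.1 == (1:Int)) ++ ys.filter (fun p => p.1 == (0:Int)),
            before x y = true := by
          intro y hy
          simp only [List.mem_append] at hy
          rcases hy with hy | hy
          · simp [hb, m1 y hy, hk]
          · simp [hb, m0 y hy, hk]
        rw [insertBy_append before x _ _ hpre, insertBy_all_before before x _ hsuf]
        simp [List.filter_append, hk, List.append_assoc]
      · -- score 3 : right after bucket 3
        rw [List.append_assoc, List.append_assoc]
        have hpre : ∀ y ∈ ys.filter (fun p => p.1 == (3:Int)), before x y = false := by
          intro y hy; simp [hb, m3 y hy, hk]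
        have hsuf : ∀ y ∈ ys.filter (fun p => p.1 == (2:Int)) ++
            (ys.filter (fun p => p.1 == (1:Int)) ++ ys.filter (fun p => p.1 == (0:Int))),
            before x y = true := by
          intro y hy
          simp only [List.mem_append] at hy
          rcases hy with hy | hy | hy
          · simp [hb, m2 y hy, hk]
          · simp [hb, m1 y hy, hk]
          · simp [hb, m0 y hy, hk]
        rw [insertBy_append before x _ _ hpre, insertBy_all_before before x _ hsuf]
        simp [List.filter_append, hk, List.append_assoc]

lemma pvF_append_single (i : Int) (u : List String) (url : String) :
    pvF i (u ++ [url]) = pvF i u ++ (if pvScore url = i then [url] else []) := by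
  by_cases hs : pvScore url = i <;> simp [pvF, List.filter_append, hs]

lemma fold_inv (urls : List String) (s : PySem.Set String) (u : List String) :
    urls.foldl pvBStep (s, (pvF 3 u, pvF 2 u, pvF 1 u, pvF 0 u)) =
      ((urls.foldl pvDedupStep (s, u)).1,
        (pvF 3 (urls.foldl pvDedupStep (s, u)).2,
         pvF 2 (urls.foldl pvDedupStep (s, u)).2,
         pvF 1 (urls.foldl pvDedupStep (s, u)).2,
         pvF 0 (urls.foldl pvDedupStep (s, u)).2)) := by
  induction urls generalizing s u with
  | nil => rfl
  | cons url rest ih =>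
      simp only [List.foldl_cons]
      by_cases hc : PySem.Set.contains s url = true
      · have hA : pvDedupStep (s, u) url = (s, u) := by
          simp only [pvDedupStep]; rw [hc]; simp
        have hB : pvBStep (s, (pvF 3 u, pvF 2 u, pvF 1 u, pvF 0 u)) url
            = (s, (pvF 3 u, pvF 2 u, pvF 1 u, pvF 0 u)) := by
          simp only [pvBStep]; rw [hc]; simp
        rw [hA, hB]
        exact ih s u
      · rw [Bool.not_eq_true] at hc
        have hA : pvDedupStep (s, u) url = (PySem.Set.add s url, u ++ [url]) := by
          simp only [pvDedupStep]; rw [hc]; simp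
        have hB : pvBStep (s, (pvF 3 u, pvF 2 u, pvF 1 u, pvF 0 u)) url
            = (PySem.Set.add s url,
                (pvF 3 (u ++ [url]), pvF 2 (u ++ [url]), pvF 1 (u ++ [url]), pvF 0 (u ++ [url]))) := by
          simp only [pvBStep]; rw [hc]
          rcases pvScore_cases url with hk | hk | hk | hk <;>
            simp [pvF_append_single, hk]
        rw [hA, hB]
        exact ih (PySem.Set.add s url) (u ++ [url])

lemma map_snd_filter (i : Int) (u : List String) :
    ((u.map (fun url => (pvScore url, url))).filter (fun p => p.1 == i)).map (fun p => p.2)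
      = pvF i u := by
  rw [List.filter_map]
  simp [pvF, Function.comp_def, List.map_map]

-- ===== VERDICT (by name: the statement is the Claim_ definition above) =====
theorem prioritize_js_urls_py_spec : Claim_equal_prioritize_js_urls_py := by
  intro urls _
  unfold Spec_prioritize_js_urls_py
  show List.map (fun p => p.2)
      (PySem.List.sorted
        (List.foldl pvScoreStepA [] (List.foldl pvDedupStep (PySem.Set.empty, []) urls).2)
        (fun item => item.1) true)
    = (List.foldl pvBStep (PySem.Set.empty, ([], [], [], [])) urls).2.1 ++
      (List.foldl pvBStep (PySem.Set.empty, ([], [], [], [])) urls).2.2.1 ++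
      (List.foldl pvBStep (PySem.Set.empty, ([], [], [], [])) urls).2.2.2.1 ++
      (List.foldl pvBStep (PySem.Set.empty, ([], [], [], [])) urls).2.2.2.2
  have hB := fold_inv urls PySem.Set.empty []
  simp only [pvF, List.filter_nil] at hB
  rw [hB, foldA_scored, List.nil_append]
  have hkeys : ∀ p ∈ ((List.foldl pvDedupStep (PySem.Set.empty, []) urls).2).map
      (fun url => (pvScore url, url)), p.1 = 0 ∨ p.1 = 1 ∨ p.1 = 2 ∨ p.1 = 3 := by
    intro p hp
    simp only [List.mem_map] at hp
    obtain ⟨url, _, rfl⟩ := hp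
    exact pvScore_cases url
  rw [sorted_rev_buckets _ hkeys]
  simp [List.map_append, map_snd_filter, pvF]
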